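-- pv_equiv track=rewrite | github.com/chankxow/KU-STUDENT-Y1 | L05/19_l05.py | get_unique_vowels_and_consonants
-- ===== SOURCE A (Python) =====
-- def get_unique_vowels_and_consonants(text):
--     vowels = "aeiouAEIOU"
--     consonants = "bcdfghjklmnpqrstvwxyzBCDFGHJKLMNPQRSTVWXYZ"
--
--     unique_vowels = []
--     unique_consonants = []
--
--     for char in text:
--         if char in vowels and char.lower() not in unique_vowels:
--             unique_vowels.append(char.lower())
--         elif char in consonants and char.lower() not in unique_consonants:
--             unique_consonants.append(char.lower())
--
--     return unique_vowels, unique_consonants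
-- ===== SOURCE B (Python) =====
-- def get_unique_vowels_and_consonants(text):
--     vowels = "aeiouAEIOU"
--     consonants = "bcdfghjklmnpqrstvwxyzBCDFGHJKLMNPQRSTVWXYZ"
--     unique_vowels = list(dict.fromkeys(c.lower() for c in text if c in vowels))
--     unique_consonants = list(dict.fromkeys(c.lower() for c in text if c in consonants))
--     return unique_vowels, unique_consonants
-- ===== Notes on version B (the rewrite author's own statement) =====
-- stated objective: idiomatic
-- what changed: Replaces the single interleaved loop with inline list-membership dedup by two filter-and-lower passes each deduplicated order-preservingly via dict.fromkeys; the vowel and consonant alphabets are disjoint, so the split is exact.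
import Mathlib
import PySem

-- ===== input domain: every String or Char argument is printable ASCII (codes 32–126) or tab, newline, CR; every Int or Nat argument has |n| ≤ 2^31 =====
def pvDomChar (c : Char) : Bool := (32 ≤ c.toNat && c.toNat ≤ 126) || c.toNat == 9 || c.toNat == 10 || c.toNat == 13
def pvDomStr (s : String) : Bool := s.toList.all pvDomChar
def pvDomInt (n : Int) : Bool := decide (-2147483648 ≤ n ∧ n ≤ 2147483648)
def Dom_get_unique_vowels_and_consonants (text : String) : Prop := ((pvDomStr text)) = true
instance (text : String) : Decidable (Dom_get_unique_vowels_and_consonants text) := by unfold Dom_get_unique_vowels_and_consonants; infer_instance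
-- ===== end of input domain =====

-- B replaces A's single interleaved dedup loop by two filter-then-ordered-dedup passes (dict.fromkeys); idiomatic, return value proved equal.


-- ===== PORT A =====
-- 'c.lower()' on a one-character string (exact on ASCII via PySem.Chars.lower)
def pvLower1 (c : Char) : String := String.ofList (PySem.Chars.lower [c])

def pvVowels : List Char := "aeiouAEIOU".toList
def pvConsonants : List Char := "bcdfghjklmnpqrstvwxyzBCDFGHJKLMNPQRSTVWXYZ".toList

-- one iteration of A's for-loop body (branches in A's order)
def pvStepA (acc : List String × List String) (c : Char) : List String × List String :=
  if c ∈ pvVowels ∧ pvLower1 c ∉ acc.1 then (acc.1 ++ [pvLower1 c], acc.2)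
  else if c ∈ pvConsonants ∧ pvLower1 c ∉ acc.2 then (acc.1, acc.2 ++ [pvLower1 c])
  else acc

def get_unique_vowels_and_consonants (text : String) : List String × List String :=
  text.toList.foldl pvStepA ([], [])

-- ===== PORT B =====
def get_unique_vowels_and_consonants_alt (text : String) : List String × List String :=
  (PySem.List.dedup ((text.toList.filter (· ∈ pvVowels)).map pvLower1),
   PySem.List.dedup ((text.toList.filter (· ∈ pvConsonants)).map pvLower1))

-- ===== PRECONDITION & SPEC =====
def Spec_get_unique_vowels_and_consonants (text : String) (out : List String × List String) : Prop := out = get_unique_vowels_and_consonants_alt text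
instance (text : String) (out : List String × List String) : Decidable (Spec_get_unique_vowels_and_consonants text out) := by unfold Spec_get_unique_vowels_and_consonants; infer_instance

-- ===== CLAIM (what is proved, stated in full; the proofs are below) =====
def Claim_equal_get_unique_vowels_and_consonants : Prop := ∀ (text : String), Dom_get_unique_vowels_and_consonants text → Spec_get_unique_vowels_and_consonants text (get_unique_vowels_and_consonants text)

-- ===== LEMMAS AND PROOFS =====

lemma pv_disjoint (c : Char) (hv : c ∈ pvVowels) : c ∉ pvConsonants := by
  intro hc
  simp [pvVowels] at hv
  rcases hv with rfl|rfl|rfl|rfl|rfl|rfl|rfl|rfl|rfl|rfl <;> simp [pvConsonants] at hc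

lemma pv_loop_eq (cs : List Char) : ∀ uv uc : List String,
    cs.foldl pvStepA (uv, uc) =
      (((cs.filter (· ∈ pvVowels)).map pvLower1).foldl PySem.Set.add uv,
       ((cs.filter (· ∈ pvConsonants)).map pvLower1).foldl PySem.Set.add uc) := by
  induction cs with
  | nil => intro uv uc; simp
  | cons c cs ih =>
    intro uv uc
    by_cases hv : c ∈ pvVowels
    · have hc : c ∉ pvConsonants := pv_disjoint c hv
      simp only [List.foldl_cons, List.filter_cons, hv, hc, if_pos, decide_true,
        decide_false, Bool.false_eq_true, if_false, List.map_cons]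
      rw [ih]
      by_cases hm : pvLower1 c ∈ uv <;>
        simp [pvStepA, hv, hc, hm, PySem.Set.add, List.contains_iff_mem]
    · by_cases hc : c ∈ pvConsonants
      · simp only [List.foldl_cons, List.filter_cons, hv, hc, decide_true,
          decide_false, Bool.false_eq_true, if_false, if_pos, List.map_cons]
        rw [ih]
        by_cases hm : pvLower1 c ∈ uc <;>
          simp [pvStepA, hv, hc, hm, PySem.Set.add, List.contains_iff_mem]
      · simp only [List.foldl_cons, List.filter_cons, hv, hc, decide_false,
          Bool.false_eq_true, if_false]
        rw [ih]
        simp [pvStepA, hv, hc]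

-- ===== VERDICT (by name: the statement is the Claim_ definition above) =====
theorem get_unique_vowels_and_consonants_spec : Claim_equal_get_unique_vowels_and_consonants := by
  intro text _
  show get_unique_vowels_and_consonants text = get_unique_vowels_and_consonants_alt text
  simp [get_unique_vowels_and_consonants, get_unique_vowels_and_consonants_alt,
    PySem.List.dedup, PySem.Set.ofList, PySem.Set.empty, pv_loop_eq]
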